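-- pv_equiv track=rewrite | github.com/livelyRyan/i | scripts/render_resume.py | split_projects
-- ===== SOURCE A (Python) =====
-- from typing import List, Optional, Tuple
--
-- def split_projects(block: str) -> List[Tuple[str, List[str]]]:
--     """Split into (header_line, body_lines)."""
--     lines = block.splitlines()
--     projects: List[Tuple[str, List[str]]] = []
--     i = 0
--     while i < len(lines):
--         line = lines[i].strip()
--         if line.startswith("**") and "|" in line:
--             header = lines[i].rstrip()
--             i += 1
--             body: List[str] = []
--             while i < len(lines):
--                 nxt = lines[i]
--                 stripped = nxt.strip()
--                 if stripped.startswith("## "):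
--                     break
--                 if stripped.startswith("**") and "|" in stripped and i > 0:
--                     break
--                 body.append(nxt)
--                 i += 1
--             projects.append((header, body))
--         else:
--             i += 1
--     return projects
-- ===== SOURCE B (Python) =====
-- from typing import List, Optional, Tuple
--
-- def split_projects(block: str) -> List[Tuple[str, List[str]]]:
--     """Split into (header_line, body_lines) in one flat pass with an open-project state."""
--     projects: List[Tuple[str, List[str]]] = []
--     current: Optional[Tuple[str, List[str]]] = None
--     for raw in block.splitlines():
--         s = raw.strip()
--         if s.startswith("**") and "|" in s:
--             if current is not None:
--                 projects.append(current)
--             current = (raw.rstrip(), [])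
--         elif current is not None:
--             if s.startswith("## "):
--                 projects.append(current)
--                 current = None
--             else:
--                 current[1].append(raw)
--     if current is not None:
--         projects.append(current)
--     return projects
-- ===== Notes on version B (the rewrite author's own statement) =====
-- stated objective: simpler
-- what changed: Replaced A's nested while-loops with manual index arithmetic by a single flat pass over the lines maintaining an optional open (header, body) state.
import Mathlib
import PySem

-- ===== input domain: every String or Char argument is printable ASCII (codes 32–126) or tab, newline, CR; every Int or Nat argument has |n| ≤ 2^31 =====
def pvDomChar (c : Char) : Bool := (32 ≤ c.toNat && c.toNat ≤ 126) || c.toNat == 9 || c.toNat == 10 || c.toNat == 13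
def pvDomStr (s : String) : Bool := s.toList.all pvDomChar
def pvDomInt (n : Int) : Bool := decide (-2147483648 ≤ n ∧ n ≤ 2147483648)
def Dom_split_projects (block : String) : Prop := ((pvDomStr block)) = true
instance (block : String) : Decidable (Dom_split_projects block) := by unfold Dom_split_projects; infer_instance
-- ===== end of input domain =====

-- B replaces A's nested while-loops and index arithmetic by one flat pass with an open-project state (objective: simpler).

-- ===== PORT A =====
-- inner while loop of A: collects body lines from index i, returns (body, stop index)
def pvInnerA (lines : List String) (i : Nat) (body : List String) : List String × Nat :=
  if h : i < lines.length then
    let nxt := lines[i]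
    let stripped := PySem.Str.strip nxt
    if PySem.Str.startswith stripped "## " then (body, i)
    else if PySem.Str.startswith stripped "**" && PySem.Str.isIn "|" stripped && decide (0 < i) then (body, i)
    else pvInnerA lines (i + 1) (body ++ [nxt])
  else (body, i)
termination_by lines.length - i

-- the port's outer loop needs this to terminate (inner never moves the index backwards)
theorem pvInnerA_ge (lines : List String) (i : Nat) (b : List String) :
    i ≤ (pvInnerA lines i b).2 := by
  rw [pvInnerA.eq_def]
  by_cases h : i < lines.length
  · simp only [h, dif_pos]
    split_ifs
    · simp
    · simp
    · have := pvInnerA_ge lines (i + 1) (b ++ [lines[i]]); omega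
  · simp [h]
termination_by lines.length - i

-- outer while loop of A
def pvOuterA (lines : List String) (i : Nat) : List (String × List String) :=
  if h : i < lines.length then
    let line := PySem.Str.strip lines[i]
    if PySem.Str.startswith line "**" && PySem.Str.isIn "|" line then
      let r := pvInnerA lines (i + 1) []
      (PySem.Str.rstrip lines[i], r.1) :: pvOuterA lines r.2
    else pvOuterA lines (i + 1)
  else []
termination_by lines.length - i
decreasing_by
  · have := pvInnerA_ge lines (i + 1) []; omega
  · omega

def split_projects (block : String) : List (String × List String) :=
  pvOuterA (PySem.Str.splitlines block) 0

-- ===== PORT B =====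
-- one step of B's flat pass: state = (finished projects, optional open (header, body))
def pvStepB (acc : List (String × List String) × Option (String × List String)) (raw : String) :
    List (String × List String) × Option (String × List String) :=
  let s := PySem.Str.strip raw
  if PySem.Str.startswith s "**" && PySem.Str.isIn "|" s then
    (acc.1 ++ acc.2.toList, some (PySem.Str.rstrip raw, []))
  else
    match acc.2 with
    | none => acc
    | some (h, b) =>
      if PySem.Str.startswith s "## " then (acc.1 ++ [(h, b)], none)
      else (acc.1, some (h, b ++ [raw]))

def split_projects_alt (block : String) : List (String × List String) :=
  let r := (PySem.Str.splitlines block).foldl pvStepB ([], none)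
  r.1 ++ r.2.toList

-- ===== PRECONDITION & SPEC =====
def Spec_split_projects (block : String) (out : List (String × List String)) : Prop := out = split_projects_alt block
instance (block : String) (out : List (String × List String)) : Decidable (Spec_split_projects block out) := by unfold Spec_split_projects; infer_instance

-- ===== CLAIM (what is proved, stated in full; the proofs are below) =====
def Claim_equal_split_projects : Prop := ∀ (block : String), Dom_split_projects block → Spec_split_projects block (split_projects block)

-- ===== LEMMAS AND PROOFS =====

def pvFin (r : List (String × List String) × Option (String × List String)) : List (String × List String) :=
  r.1 ++ r.2.toList

-- B's step only appends to the finished-projects component, so that component factors out of the fold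
theorem pvStep_shift (l : List String) (p : List (String × List String))
    (c : Option (String × List String)) :
    l.foldl pvStepB (p, c) =
      (p ++ (l.foldl pvStepB ([], c)).1, (l.foldl pvStepB ([], c)).2) := by
  induction l generalizing p c with
  | nil => simp
  | cons a l ih =>
    have hstep : pvStepB (p, c) a = (p ++ (pvStepB ([], c) a).1, (pvStepB ([], c) a).2) := by
      rcases c with _ | ⟨h, b⟩ <;> dsimp only [pvStepB] <;> split_ifs <;> simp
    obtain ⟨q, d, hqd⟩ : ∃ q d, pvStepB ([], c) a = (q, d) := ⟨_, _, rfl⟩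
    rw [hqd] at hstep
    rw [List.foldl_cons, List.foldl_cons, hstep, hqd, ih (p ++ q) d, ih q d]
    simp

-- a line whose strip starts with "## " is never a project header
theorem pvNotBoth (s : List Char) (h : PySem.Chars.startswith s ['#', '#', ' '] = true) :
    PySem.Chars.startswith s ['*', '*'] = false := by
  rw [PySem.Chars.startswith_iff] at h
  obtain ⟨t, ht⟩ := h
  by_contra hc
  rw [Bool.not_eq_false, PySem.Chars.startswith_iff] at hc
  obtain ⟨u, hu⟩ := hc
  rw [← ht] at hu
  simp at hu

-- degenerate case: index past the end
theorem pvBase (lines : List String) (i : Nat) (hge : lines.length ≤ i) :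
    (pvFin ((lines.drop i).foldl pvStepB ([], none)) = pvOuterA lines i) ∧
    (∀ h b, pvFin ((lines.drop i).foldl pvStepB ([], some (h, b))) =
      (h, (pvInnerA lines i b).1) :: pvOuterA lines (pvInnerA lines i b).2) := by
  have hd : lines.drop i = [] := List.drop_eq_nil_of_le hge
  have hno : ¬ i < lines.length := by omega
  constructor
  · rw [hd, pvOuterA.eq_def]; simp [hno, pvFin]
  · intro h b
    rw [hd, pvInnerA.eq_def]
    simp only [hno, dif_neg, not_false_iff]
    rw [pvOuterA.eq_def]; simp [hno, pvFin]

-- main invariant: B's fold from index i simulates A's outer loop (state none)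
-- and A's inner loop (state some (h, b), reached only with 1 ≤ i)
set_option maxHeartbeats 1000000 in
theorem pvMain (lines : List String) (n : Nat) : ∀ i, lines.length - i ≤ n →
    (pvFin ((lines.drop i).foldl pvStepB ([], none)) = pvOuterA lines i) ∧
    (∀ h b, 1 ≤ i → pvFin ((lines.drop i).foldl pvStepB ([], some (h, b))) =
      (h, (pvInnerA lines i b).1) :: pvOuterA lines (pvInnerA lines i b).2) := by
  induction n with
  | zero =>
    intro i hi
    exact ⟨(pvBase lines i (by omega)).1, fun h b _ => (pvBase lines i (by omega)).2 h b⟩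
  | succ n ih =>
    intro i hi
    by_cases hlt : i < lines.length
    · have hd : lines.drop i = lines[i] :: lines.drop (i + 1) := (List.getElem_cons_drop hlt).symm
      have ihn := ih (i + 1) (by omega)
      by_cases hh : (PySem.Str.startswith (PySem.Str.strip lines[i]) "**" &&
          PySem.Str.isIn "|" (PySem.Str.strip lines[i])) = true
      · -- lines[i] opens a project
        have houter : pvOuterA lines i =
            (PySem.Str.rstrip lines[i], (pvInnerA lines (i + 1) []).1) ::
              pvOuterA lines (pvInnerA lines (i + 1) []).2 := by
          conv_lhs => rw [pvOuterA.eq_def]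
          simp only [hlt, dif_pos]
          rw [if_pos hh]
        have hfold : ∀ c, pvFin ((lines.drop i).foldl pvStepB ([], c)) =
            c.toList ++
              pvFin ((lines.drop (i + 1)).foldl pvStepB
                ([], some (PySem.Str.rstrip lines[i], []))) := by
          intro c
          have hstep : pvStepB ([], c) lines[i] =
              (c.toList, some (PySem.Str.rstrip lines[i], [])) := by
            dsimp only [pvStepB]
            rw [if_pos hh]
            simp
          rw [hd, List.foldl_cons, hstep, pvStep_shift]
          simp [pvFin, List.append_assoc]
        constructor
        · rw [hfold none, ihn.2 _ _ (by omega)]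
          simp [houter]
        · intro h b h1
          have hns : PySem.Str.startswith (PySem.Str.strip lines[i]) "## " = false := by
            cases hc : PySem.Str.startswith (PySem.Str.strip lines[i]) "## " with
            | false => rfl
            | true =>
              have h3 := pvNotBoth (PySem.Chars.strip lines[i].toList) (by simpa using hc)
              have h4 : PySem.Str.startswith (PySem.Str.strip lines[i]) "**" = false := by
                simpa using h3
              simp only [Bool.and_eq_true] at hh
              rw [hh.1] at h4
              cases h4
          have hinner : pvInnerA lines i b = (b, i) := by
            rw [pvInnerA.eq_def]
            simp only [hlt, dif_pos]
            rw [if_neg (by simp only [hns]; exact Bool.false_ne_true)]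
            rw [if_pos (by
              simp only [Bool.and_eq_true, decide_eq_true_eq] at hh ⊢
              exact ⟨⟨hh.1, hh.2⟩, by omega⟩)]
          rw [hfold (some (h, b)), ihn.2 _ _ (by omega)]
          simp [hinner, houter]
      · have hh' : (PySem.Str.startswith (PySem.Str.strip lines[i]) "**" &&
            PySem.Str.isIn "|" (PySem.Str.strip lines[i])) = false := by
          simpa using hh
        have hstepN : pvStepB ([], none) lines[i] = ([], none) := by
          dsimp only [pvStepB]
          rw [if_neg hh]
        have houter2 : pvOuterA lines i = pvOuterA lines (i + 1) := by
          conv_lhs => rw [pvOuterA.eq_def]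
          simp only [hlt, dif_pos]
          rw [if_neg hh]
        have ihn1' : (List.foldl pvStepB ([], none) (lines.drop (i + 1))).1 ++
            (List.foldl pvStepB ([], none) (lines.drop (i + 1))).2.toList =
            pvOuterA lines (i + 1) := by
          simpa [pvFin] using ihn.1
        by_cases h2 : PySem.Str.startswith (PySem.Str.strip lines[i]) "## " = true
        · -- "## " line: closes any open project
          constructor
          · rw [hd, List.foldl_cons, hstepN, ihn.1, houter2]
          · intro h b h1
            have hinner2 : pvInnerA lines i b = (b, i) := by
              rw [pvInnerA.eq_def]
              simp only [hlt, dif_pos]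
              rw [if_pos h2]
            have hstepS : pvStepB ([], some (h, b)) lines[i] = ([(h, b)], none) := by
              dsimp only [pvStepB]
              rw [if_neg hh, if_pos h2]
              simp
            rw [hd, List.foldl_cons, hstepS, pvStep_shift]
            simp [pvFin, hinner2, houter2, ihn1']
        · -- ordinary line
          have h2' : PySem.Str.startswith (PySem.Str.strip lines[i]) "## " = false := by
            simpa using h2
          constructor
          · rw [hd, List.foldl_cons, hstepN, ihn.1, houter2]
          · intro h b h1
            have hstepS : pvStepB ([], some (h, b)) lines[i] =
                ([], some (h, b ++ [lines[i]])) := by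
              dsimp only [pvStepB]
              rw [if_neg hh, if_neg h2]
            have hinner3 : pvInnerA lines i b = pvInnerA lines (i + 1) (b ++ [lines[i]]) := by
              conv_lhs => rw [pvInnerA.eq_def]
              simp only [hlt, dif_pos]
              rw [if_neg (by simp only [h2']; exact Bool.false_ne_true),
                if_neg (by
                  simp only [Bool.and_eq_true, decide_eq_true_eq]
                  exact fun hc => hh (by simp only [Bool.and_eq_true]; exact hc.1))]
            rw [hd, List.foldl_cons, hstepS, ihn.2 _ _ (by omega), hinner3]
    · exact ⟨(pvBase lines i (by omega)).1, fun h b _ => (pvBase lines i (by omega)).2 h b⟩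

-- ===== VERDICT (by name: the statement is the Claim_ definition above) =====
theorem split_projects_spec : Claim_equal_split_projects := by
  intro block _
  unfold Spec_split_projects split_projects split_projects_alt
  have := (pvMain (PySem.Str.splitlines block) (PySem.Str.splitlines block).length 0 (by omega)).1
  simpa [pvFin] using this.symm
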